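-- pv_equiv track=rewrite | github.com/Jie211/mc | ReverseCommon.py | has_left_reversible_stone
-- ===== SOURCE A (Python) =====
-- NONE = None
--
-- def has_left_reversible_stone(board, i, j, color):
--     """ 指定座標の左側に返せる石があるか調べる """
--     enemy = not(bool(color))
--     if j >=2 and board[i][j-1] == enemy:
--         for k in range(j - 2, -1, -1):
--             if board[i][k] == color:
--                 return True
--             elif board[i][k] == NONE:
--                 break
--     return False
-- ===== SOURCE B (Python) =====
-- def has_left_reversible_stone(board, i, j, color):
--     """ 指定座標の左側に返せる石があるか調べる """
--     if j < 2:
--         return False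
--     enemy = not bool(color)
--     seg = board[i][:j][::-1]          # cells at columns j-1, j-2, ..., 0 (nearest first)
--     try:
--         p = seg.index(color)          # nearest own stone to the left
--     except ValueError:
--         return False
--     return p >= 1 and all(c == enemy for c in seg[:p])
-- ===== Notes on version B (the rewrite author's own statement) =====
-- stated objective: alternative
-- what changed: Instead of scanning leftwards cell by cell with early return/break, B materialises the reversed left segment, locates the nearest own-color stone with list.index, and then verifies with all() that the whole prefix before it is enemy stones and nonempty (staged passes over a slice vs a single indexed scan).
import Mathlib
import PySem

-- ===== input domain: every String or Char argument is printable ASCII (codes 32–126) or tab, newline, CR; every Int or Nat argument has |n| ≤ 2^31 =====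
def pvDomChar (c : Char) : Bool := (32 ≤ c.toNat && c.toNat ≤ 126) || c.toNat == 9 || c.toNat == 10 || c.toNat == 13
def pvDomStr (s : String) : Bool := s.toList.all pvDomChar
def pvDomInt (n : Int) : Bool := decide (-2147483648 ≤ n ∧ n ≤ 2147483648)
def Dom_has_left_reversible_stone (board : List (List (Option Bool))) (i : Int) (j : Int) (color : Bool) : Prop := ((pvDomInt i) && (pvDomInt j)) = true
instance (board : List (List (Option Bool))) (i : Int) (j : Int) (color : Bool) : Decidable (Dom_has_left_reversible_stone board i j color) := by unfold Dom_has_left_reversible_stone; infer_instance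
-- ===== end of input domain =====

-- B replaces A's leftward index scan with early return/break by staged passes over the reversed
-- left slice: find the nearest own-color stone with list.index, then check the prefix before it
-- is a nonempty all-enemy run; same cost, genuinely different decomposition.

-- ===== PORT A =====
-- Python's `for k in range(j-2, -1, -1)` with `return True` / `break` inside, scanned over the
-- same range list; cell accesses are total via getD — Pre_ guarantees they are in range.
def pvLoopA (row : List (Option Bool)) (color : Bool) : List Int → Bool
  | [] => false
  | k :: ks =>
    let cell := (PySem.List.pyGet? row k).getD none
    if cell = some color then true
    else if cell = none then false
    else pvLoopA row color ks

def has_left_reversible_stone (board : List (List (Option Bool))) (i : Int) (j : Int) (color : Bool) : Bool :=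
  let enemy := !color
  if 2 ≤ j ∧ (PySem.List.pyGet? ((PySem.List.pyGet? board i).getD []) (j - 1)).getD none = some enemy then
    pvLoopA ((PySem.List.pyGet? board i).getD []) color (PySem.List.pyRange (j - 2) (-1) (-1))
  else
    false

-- ===== PORT B =====
-- Source B: seg = board[i][:j][::-1]; p = seg.index(color) (ValueError → False);
-- return p >= 1 and all(c == enemy for c in seg[:p]).  seg[:p] with p : Nat is List.take p.
def has_left_reversible_stone_alt (board : List (List (Option Bool))) (i : Int) (j : Int) (color : Bool) : Bool :=
  if j < 2 then false
  else
    let enemy := !color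
    let row := (PySem.List.pyGet? board i).getD []
    let seg := (PySem.List.slice? (PySem.List.slice row none (some j)) none none (-1)).getD []
    match PySem.List.index? seg (some color) with
    | none => false
    | some p => decide (1 ≤ p ∧ (seg.take p).all (fun c => c = some enemy))

-- ===== PRECONDITION & SPEC =====
-- Pre_ excludes exactly the inputs where the Python A raises an IndexError: when j ≥ 2 it
-- indexes board[i] and board[i][j-1] (and then only smaller nonnegative column indices).
def Pre_has_left_reversible_stone (board : List (List (Option Bool))) (i : Int) (j : Int) (color : Bool) : Prop :=
  2 ≤ j → PySem.Raise.InRange board.length i ∧ j - 1 < ((PySem.List.pyGet? board i).getD []).length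

instance (board : List (List (Option Bool))) (i : Int) (j : Int) (color : Bool) : Decidable (Pre_has_left_reversible_stone board i j color) := by unfold Pre_has_left_reversible_stone; infer_instance

def pvWitness_has_left_reversible_stone : List (List (Option Bool)) × Int × Int × Bool :=
  ([[some true, some false, none]], 0, 2, true)

def Spec_has_left_reversible_stone (board : List (List (Option Bool))) (i : Int) (j : Int) (color : Bool) (out : Bool) : Prop := out = has_left_reversible_stone_alt board i j color
instance (board : List (List (Option Bool))) (i : Int) (j : Int) (color : Bool) (out : Bool) : Decidable (Spec_has_left_reversible_stone board i j color out) := by unfold Spec_has_left_reversible_stone; infer_instance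

-- ===== CLAIM (what is proved, stated in full; the proofs are below) =====
def Claim_equal_has_left_reversible_stone : Prop := ∀ (board : List (List (Option Bool))) (i : Int) (j : Int) (color : Bool), Dom_has_left_reversible_stone board i j color → Pre_has_left_reversible_stone board i j color → Spec_has_left_reversible_stone board i j color (has_left_reversible_stone board i j color)


-- ===== LEMMAS AND PROOFS =====

-- abstract form of A's scan over a concrete list (nearest cell first)
def pvFirst (color : Bool) : List (Option Bool) → Bool
  | [] => false
  | c :: cs =>
    if c = some color then true
    else if c = none then false
    else pvFirst color cs

-- abstract form of B's tail decision: color occurs and the prefix before it is all enemies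
def pvBTail (color : Bool) (xs : List (Option Bool)) : Bool :=
  match PySem.List.index? xs (some color) with
  | none => false
  | some q => (xs.take q).all (fun c => c = some (!color))

lemma pyRange_down_neg (k : Int) (hk : k < 0) : PySem.List.pyRange k (-1) (-1) = [] := by
  simp [PySem.List.pyRange]
  omega

lemma pyRange_down_cons (k : Int) (hk : 0 ≤ k) :
    PySem.List.pyRange k (-1) (-1) = k :: PySem.List.pyRange (k - 1) (-1) (-1) := by
  rcases Int.eq_ofNat_of_zero_le hk with ⟨n, rfl⟩
  simp only [PySem.List.pyRange]
  norm_num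
  rw [if_pos (show (-1 : Int) < n by omega)]
  rcases Nat.eq_zero_or_pos n with rfl | h0
  · simp
  · rw [if_pos h0, List.range_succ_eq_map]
    simp only [List.map_cons, List.map_map]
    norm_num
    intro a _
    ring

-- A's indexed scan from k downwards equals pvFirst on the reversed prefix row[:k+1][::-1]
lemma pvLoopA_eq_first (row : List (Option Bool)) (color : Bool) :
    ∀ (n : Nat) (k : Int), (k + 1).toNat ≤ n → k < (row.length : Int) →
      pvLoopA row color (PySem.List.pyRange k (-1) (-1)) =
        pvFirst color ((row.take (k + 1).toNat).reverse) := by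
  intro n
  induction n with
  | zero =>
    intro k hk _
    have hneg : k < 0 := by omega
    rw [pyRange_down_neg k hneg]
    have h0 : (k + 1).toNat = 0 := by omega
    simp [pvLoopA, pvFirst, h0]
  | succ n ih =>
    intro k hk hlen
    by_cases hneg : k < 0
    · rw [pyRange_down_neg k hneg]
      have h0 : (k + 1).toNat = 0 := by omega
      simp [pvLoopA, pvFirst, h0]
    · push_neg at hneg
      rcases Int.eq_ofNat_of_zero_le hneg with ⟨m, rfl⟩
      have hm : m < row.length := by exact_mod_cast hlen
      have htake : (((m : Int) + 1).toNat) = m + 1 := by omega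
      have hsplit : row.take (m + 1) = row.take m ++ [row[m]] := by
        rw [List.take_succ]
        simp [List.getElem?_eq_getElem hm]
      have hget : row[m]?.getD none = row[m] := by
        simp [List.getElem?_eq_getElem hm]
      rw [pyRange_down_cons _ hneg]
      rw [htake, hsplit, List.reverse_append]
      simp only [List.reverse_cons, List.reverse_nil, List.nil_append, List.singleton_append]
      rcases hcell : row[m] with _ | b
      · simp [pvLoopA, pvFirst, hget, hcell]
      · by_cases hb : b = color
        · simp [pvLoopA, pvFirst, hget, hcell, hb]
        · have h1 : pvLoopA row color ((m : Int) :: PySem.List.pyRange ((m : Int) - 1) (-1) (-1)) =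
              pvLoopA row color (PySem.List.pyRange ((m : Int) - 1) (-1) (-1)) := by
            simp [pvLoopA, hget, hcell, hb]
          have h2 : pvFirst color (some b :: (row.take m).reverse) =
              pvFirst color ((row.take m).reverse) := by
            simp [pvFirst, hb]
          rw [h1, h2]
          exact (ih ((m : Int) - 1) (by omega) (by omega)).trans
            (by rw [show (((m : Int) - 1 + 1)).toNat = m by omega])

-- pvFirst equals B's index/all characterisation on the tail
lemma pvFirst_eq_bTail (color : Bool) (xs : List (Option Bool)) :
    pvFirst color xs = pvBTail color xs := by
  induction xs with
  | nil => simp [pvFirst, pvBTail]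
  | cons c cs ih =>
    by_cases hc : c = some color
    · subst hc
      simp only [pvBTail]
      rw [PySem.List.index?_cons_self]
      simp [pvFirst]
    · simp only [pvBTail]
      rw [PySem.List.index?_cons_of_ne _ hc]
      rcases hcase : PySem.List.index? cs (some color) with _ | q
      · rcases c with _ | b
        · simp [pvFirst]
        · have hb : b = !color := by cases b <;> cases color <;> simp_all
          simp only [pvFirst]
          rw [if_neg hc, if_neg (by simp), ih]
          simp only [pvBTail]
          rw [hcase]
          simp
      · rcases c with _ | b
        · simp [pvFirst, List.take_succ_cons]
        · have hb : b = !color := by cases b <;> cases color <;> simp_all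
          simp only [pvFirst]
          rw [if_neg hc, if_neg (by simp), ih]
          simp only [pvBTail]
          rw [hcase]
          simp [List.take_succ_cons, hb]

lemma all_eq_decide_forall (l : List (Option Bool)) (v : Option Bool) :
    (l.all fun c => decide (c = v)) = decide (∀ x ∈ l, x = v) := by
  induction l with
  | nil => simp
  | cons a l ih => simp [List.forall_mem_cons, Bool.decide_and, ih]

lemma seg_eq (row : List (Option Bool)) (j : Int) (h0 : 0 ≤ j) :
    (PySem.List.slice? (PySem.List.slice row none (some j)) none none (-1)).getD [] =
      (row.take j.toNat).reverse := by
  rw [PySem.List.slice_to, PySem.List.slice?_none_none_neg_one]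
  · rfl
  · exact h0

-- ===== VERDICT (by name: the statement is the Claim_ definition above) =====
theorem has_left_reversible_stone_spec : Claim_equal_has_left_reversible_stone := by
  intro board i j color _ hpre
  unfold Spec_has_left_reversible_stone
  by_cases hj : 2 ≤ j
  · obtain ⟨-, hjlen⟩ := hpre hj
    set row := (PySem.List.pyGet? board i).getD [] with hrow
    have hj1 : (j - 1).toNat < row.length := by omega
    have hjt : j.toNat = (j - 1).toNat + 1 := by omega
    set e := (PySem.List.pyGet? row (j - 1)).getD none with he
    set rest := (row.take (j - 1).toNat).reverse with hrest
    have hpg : PySem.List.pyGet? row (j - 1) = row[(j - 1).toNat]? := by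
      have h2 : ((((j - 1).toNat : Nat)) : Int) = j - 1 := by omega
      rw [← h2, PySem.List.pyGet?_natCast]
      simp
    have hsome : row[(j - 1).toNat]? = some e := by
      rw [he, hpg, List.getElem?_eq_getElem hj1]
      rfl
    have hsplit : row.take j.toNat = row.take (j - 1).toNat ++ [e] := by
      rw [hjt, List.take_succ, hsome]
      rfl
    have hB : has_left_reversible_stone_alt board i j color =
        (match PySem.List.index? (e :: rest) (some color) with
         | none => false
         | some p => decide (1 ≤ p ∧ ((e :: rest).take p).all (fun c => c = some (!color)))) := by
      simp only [has_left_reversible_stone_alt]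
      rw [if_neg (by omega), ← hrow, seg_eq row j (by omega), hsplit, List.reverse_append]
      simp only [List.reverse_cons, List.reverse_nil, List.nil_append, List.singleton_append,
        ← hrest]
    have hA : has_left_reversible_stone board i j color =
        (if 2 ≤ j ∧ e = some (!color) then
          pvLoopA row color (PySem.List.pyRange (j - 2) (-1) (-1)) else false) := by
      simp only [has_left_reversible_stone]
      rw [← hrow, ← he]
    by_cases hguard : e = some (!color)
    · rw [hA, hB, if_pos ⟨hj, hguard⟩]
      have hloop : pvLoopA row color (PySem.List.pyRange (j - 2) (-1) (-1)) = pvBTail color rest := by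
        have h1 : (j - 2 + 1).toNat = (j - 1).toNat := by omega
        rw [← pvFirst_eq_bTail, hrest, ← h1]
        exact pvLoopA_eq_first row color (j - 2 + 1).toNat (j - 2) le_rfl (by omega)
      rw [hloop, hguard, PySem.List.index?_cons_of_ne _ (by simp)]
      rcases hcase : PySem.List.index? rest (some color) with _ | q
      · simp only [pvBTail]
        rw [hcase]
        simp
      · simp only [pvBTail]
        rw [hcase]
        simp [List.take_succ_cons]
        exact all_eq_decide_forall _ _
    · rw [hA, hB, if_neg (by rintro ⟨-, h⟩; exact hguard h)]
      rcases hecase : e with _ | b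
      · rw [PySem.List.index?_cons_of_ne _ (by simp)]
        rcases hcase : PySem.List.index? rest (some color) with _ | q
        · simp
        · simp [List.take_succ_cons]
      · have hb : b = color := by
          cases b <;> cases color <;> first | rfl | exact absurd hecase hguard
        rw [hb, PySem.List.index?_cons_self]
        simp
  · have hA : has_left_reversible_stone board i j color = false := by
      simp only [has_left_reversible_stone]
      rw [if_neg (by rintro ⟨h, -⟩; exact hj h)]
    have hB : has_left_reversible_stone_alt board i j color = false := by
      simp only [has_left_reversible_stone_alt]
      rw [if_pos (by omega)]
    rw [hA, hB]
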